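-- pv_equiv track=rewrite | github.com/kanno321-create/shorts_studio | .preserved/harvested/hc_checks_raw/hc_checks.py | _is_language_variant
-- ===== SOURCE A (Python) =====
-- _LANGUAGE_SLUG_SUFFIXES = ("-jp", "-kr", "-en", "-ja", "-ko", "-cn", "-zh")
--
-- def _is_language_variant(slug_a: str, slug_b: str) -> bool:
--     """Return True when slug_a and slug_b are same-event different-language.
--
--     Example: ``shipman-dr-death`` and ``shipman-dr-death-jp`` are the Korean
--     and Japanese versions of the same incident story. They legitimately reuse
--     the same evidence / crime-scene / perpetrator assets — this is NOT
--     contamination.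
--
--     Detection: one slug is the other with a language suffix, OR both have
--     language suffixes and the stems match.
--     """
--     if slug_a == slug_b:
--         return False
--     # slug_b = slug_a + suffix
--     for suf in _LANGUAGE_SLUG_SUFFIXES:
--         if slug_b == slug_a + suf or slug_a == slug_b + suf:
--             return True
--     # both have suffixes with matching stem
--     stems: dict[str, str] = {}
--     for slug in (slug_a, slug_b):
--         for suf in _LANGUAGE_SLUG_SUFFIXES:
--             if slug.endswith(suf):
--                 stems[slug] = slug[: -len(suf)]
--                 break
--     if len(stems) == 2 and len(set(stems.values())) == 1:
--         return True
--     return False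
-- ===== SOURCE B (Python) =====
-- _LANGUAGE_SLUG_SUFFIXES = ("-jp", "-kr", "-en", "-ja", "-ko", "-cn", "-zh")
--
-- def _variants(slug):
--     """Every other slug naming the same event in another language."""
--     forms = {slug + suf for suf in _LANGUAGE_SLUG_SUFFIXES}
--     if slug.endswith(_LANGUAGE_SLUG_SUFFIXES):
--         stem = slug[:-3]
--         forms.add(stem)
--         forms.update(stem + suf for suf in _LANGUAGE_SLUG_SUFFIXES)
--     forms.discard(slug)
--     return forms
--
-- def _is_language_variant(slug_a: str, slug_b: str) -> bool:
--     return slug_b in _variants(slug_a)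
-- ===== Notes on version B (the rewrite author's own statement) =====
-- stated objective: alternative
-- what changed: B inverts the strategy: instead of comparing the two slugs suffix-by-suffix and keeping dict/set stem bookkeeping, it generates the full set of language-variant slugs of slug_a (slug_a plus each suffix, and, if slug_a is itself suffixed, its stem and the stem plus each suffix, minus slug_a itself) and answers by a single set-membership test of slug_b.
import Mathlib
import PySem

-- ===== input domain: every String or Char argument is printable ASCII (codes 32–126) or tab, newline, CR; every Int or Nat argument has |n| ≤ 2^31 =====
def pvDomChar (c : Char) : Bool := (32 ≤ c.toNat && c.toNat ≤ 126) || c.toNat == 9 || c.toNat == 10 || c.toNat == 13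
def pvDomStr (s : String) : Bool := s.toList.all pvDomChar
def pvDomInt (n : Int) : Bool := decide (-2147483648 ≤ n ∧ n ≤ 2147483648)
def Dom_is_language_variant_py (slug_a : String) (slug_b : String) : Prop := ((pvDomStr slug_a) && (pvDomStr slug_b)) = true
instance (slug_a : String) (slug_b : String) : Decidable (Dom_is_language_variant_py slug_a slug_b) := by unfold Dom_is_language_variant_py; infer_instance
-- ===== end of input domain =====

-- B generates the set of all language-variant slugs of slug_a and tests slug_b for
-- membership, replacing A's pairwise suffix comparisons and dict/set stem bookkeeping
-- (objective: alternative; similar cost).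

def pvSuffixes : List String := ["-jp", "-kr", "-en", "-ja", "-ko", "-cn", "-zh"]

-- ===== PORT A =====
-- the inner "for suf in _LANGUAGE_SLUG_SUFFIXES: if slug.endswith(suf): stems[slug] = slug[:-len(suf)]; break"
def pvStemLoopA (stems : PySem.Dict String String) (slug : String) : List String → PySem.Dict String String
  | [] => stems
  | suf :: rest =>
    if PySem.Str.endswith slug suf then
      stems.insert slug (PySem.Str.slice slug none (some (-(PySem.Str.len suf))))
    else pvStemLoopA stems slug rest

def is_language_variant_py (slug_a : String) (slug_b : String) : Bool :=
  if slug_a == slug_b then false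
  else if pvSuffixes.any (fun suf => slug_b == slug_a ++ suf || slug_a == slug_b ++ suf) then true
  else
    let stems : PySem.Dict String String :=
      [slug_a, slug_b].foldl (fun d slug => pvStemLoopA d slug pvSuffixes) PySem.Dict.empty
    if PySem.Dict.size stems == 2 && PySem.Set.len (PySem.Set.ofList (PySem.Dict.values stems)) == 1 then
      true
    else false

-- ===== PORT B =====
-- Source B's _variants: the set of all other slugs naming the same event in another language
def pvVariants (slug : String) : PySem.Set String :=
  let forms := PySem.Set.ofList (pvSuffixes.map (fun suf => slug ++ suf))
  let forms :=
    if pvSuffixes.any (fun suf => PySem.Str.endswith slug suf) then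
      let stem := PySem.Str.slice slug none (some (-3))
      pvSuffixes.foldl (fun s suf => PySem.Set.add s (stem ++ suf)) (PySem.Set.add forms stem)
    else forms
  PySem.Set.discard forms slug

def is_language_variant_py_alt (slug_a : String) (slug_b : String) : Bool :=
  PySem.Set.contains (pvVariants slug_a) slug_b

-- ===== PRECONDITION & SPEC =====
def Spec_is_language_variant_py (slug_a : String) (slug_b : String) (out : Bool) : Prop := out = is_language_variant_py_alt slug_a slug_b
instance (slug_a : String) (slug_b : String) (out : Bool) : Decidable (Spec_is_language_variant_py slug_a slug_b out) := by unfold Spec_is_language_variant_py; infer_instance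

-- ===== CLAIM =====
def Claim_equal_is_language_variant_py : Prop := ∀ (slug_a : String) (slug_b : String), Dom_is_language_variant_py slug_a slug_b → Spec_is_language_variant_py slug_a slug_b (is_language_variant_py slug_a slug_b)

-- ===== LEMMAS AND PROOFS =====

-- proof-side characterisation device: the slug minus its language suffix, if any
def pvStemB (slug : String) : List String → Option String
  | [] => none
  | suf :: rest =>
    if PySem.Str.endswith slug suf then some (PySem.Str.slice slug none (some (-3)))
    else pvStemB slug rest

-- the common characterisation both ports are proved equal to
def pvP (a b : String) : Prop :=
  a ≠ b ∧ (pvStemB b pvSuffixes = some a ∨ pvStemB a pvSuffixes = some b ∨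
           ∃ s, pvStemB a pvSuffixes = some s ∧ pvStemB b pvSuffixes = some s)

-- every language suffix has exactly 3 characters
lemma pvSuffixes_len3 : ∀ suf ∈ pvSuffixes, suf.toList.length = 3 := by decide

-- slug[:-3] on the list side
lemma pvSlice3 (s : String) :
    (PySem.Str.slice s none (some (-3))).toList = s.toList.take (s.toList.length - 3) := by
  rw [PySem.Str.toList_slice]
  exact PySem.List.slice_to_neg_ofNat s.toList 3 (by omega)

-- characterisation of the stem: it is `some a` exactly when the slug is `a` plus a suffix
lemma pvStemB_eq_some (s a : String) (L : List String) (h3 : ∀ suf ∈ L, suf.toList.length = 3) :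
    pvStemB s L = some a ↔ ∃ suf ∈ L, s = a ++ suf := by
  induction L with
  | nil => simp [pvStemB]
  | cons suf rest ih =>
    have hsuf3 : suf.toList.length = 3 := h3 suf (by simp)
    have ih' := ih (fun t ht => h3 t (by simp [ht]))
    by_cases hend : PySem.Str.endswith s suf = true
    · obtain ⟨t, ht⟩ : suf.toList <:+ s.toList := by
        rw [PySem.Str.endswith_eq] at hend
        exact (PySem.Chars.endswith_iff _ _).mp hend
      have hslice : (PySem.Str.slice s none (some (-3))).toList = t := by
        rw [pvSlice3, ← ht]
        simp [hsuf3]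
      simp only [pvStemB, hend, if_pos]
      constructor
      · rintro h
        have ha : a.toList = t := by
          rw [← hslice]; exact congrArg String.toList (Option.some.inj h).symm
        refine ⟨suf, by simp, String.toList_inj.mp ?_⟩
        rw [← ht, String.toList_append, ha]
      · rintro ⟨suf', hmem, rfl⟩
        have h3' : suf'.toList.length = 3 := h3 suf' hmem
        have : (PySem.Str.slice (a ++ suf') none (some (-3))).toList = a.toList := by
          rw [pvSlice3]
          simp [String.toList_append, h3']
        exact congrArg some (String.toList_inj.mp this)
    · simp only [pvStemB, hend, Bool.false_eq_true, not_false_iff, if_neg]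
      rw [ih']
      constructor
      · rintro ⟨suf', hm, hs⟩; exact ⟨suf', by simp [hm], hs⟩
      · rintro ⟨suf', hm, hs⟩
        rcases List.mem_cons.mp hm with rfl | hm'
        · exfalso; apply hend
          rw [PySem.Str.endswith_eq, PySem.Chars.endswith_iff, hs, String.toList_append]
          exact List.suffix_append _ _
        · exact ⟨suf', hm', hs⟩

-- A's inner dict loop inserts exactly the stem
lemma pvStemLoopA_eq (d : PySem.Dict String String) (s : String) (L : List String)
    (h3 : ∀ suf ∈ L, suf.toList.length = 3) :
    pvStemLoopA d s L = match pvStemB s L with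
      | some v => d.insert s v
      | none => d := by
  induction L with
  | nil => simp [pvStemLoopA, pvStemB]
  | cons suf rest ih =>
    have hsuf3 : PySem.Str.len suf = 3 := by
      have := h3 suf (by simp)
      simp [PySem.Str.len, this]
    by_cases hend : PySem.Str.endswith s suf = true
    · have hlen : -(PySem.Str.len suf) = (-3 : Int) := by rw [hsuf3]
      simp only [pvStemLoopA, pvStemB, hend, if_pos, hlen]
    · simp only [pvStemLoopA, pvStemB, hend, Bool.false_eq_true, not_false_iff, if_neg]
      exact ih (fun t ht => h3 t (by simp [ht]))

-- A's first loop, rephrased through the stem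
lemma pvAny_eq (a b : String) :
    (pvSuffixes.any (fun suf => b == a ++ suf || a == b ++ suf)) =
      (pvStemB b pvSuffixes == some a || pvStemB a pvSuffixes == some b) := by
  rw [Bool.eq_iff_iff]
  simp only [List.any_eq_true, Bool.or_eq_true, beq_iff_eq]
  rw [pvStemB_eq_some b a _ pvSuffixes_len3, pvStemB_eq_some a b _ pvSuffixes_len3]
  constructor
  · rintro ⟨suf, hm, h | h⟩
    · exact Or.inl ⟨suf, hm, h⟩
    · exact Or.inr ⟨suf, hm, h⟩
  · rintro (⟨suf, hm, h⟩ | ⟨suf, hm, h⟩)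
    · exact ⟨suf, hm, Or.inl h⟩
    · exact ⟨suf, hm, Or.inr h⟩

lemma pvSetLen_pair (s t : String) :
    PySem.Set.len (PySem.Set.ofList [s, t]) = if s = t then 1 else 2 := by
  by_cases h : s = t
  · simp [PySem.Set.ofList, PySem.Set.add, PySem.Set.empty, PySem.Set.len,
      PySem.Set.contains, h]
  · simp [PySem.Set.ofList, PySem.Set.add, PySem.Set.empty, PySem.Set.len,
      PySem.Set.contains, h, Ne.symm h]

-- "slug ends with some suffix" = "the stem exists"
lemma pvAnyEnds_eq (s : String) (L : List String) :
    (L.any (fun suf => PySem.Str.endswith s suf)) = (pvStemB s L).isSome := by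
  induction L with
  | nil => simp [pvStemB]
  | cons suf rest ih =>
    simp only [PySem.Str.endswith_eq] at ih
    by_cases hend : PySem.Chars.endswith s.toList suf.toList = true
    · simp [pvStemB, PySem.Str.endswith_eq, hend]
    · simp [pvStemB, PySem.Str.endswith_eq, hend, ih]

-- when the stem exists it is slug[:-3]
lemma pvStemB_eq_slice (s v : String) (L : List String) (h : pvStemB s L = some v) :
    v = PySem.Str.slice s none (some (-3)) := by
  induction L with
  | nil => simp [pvStemB] at h
  | cons suf rest ih =>
    by_cases hend : PySem.Str.endswith s suf = true
    · simp only [pvStemB, hend, if_pos, Option.some.injEq] at h; exact h.symm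
    · simp only [pvStemB, hend, Bool.false_eq_true, not_false_iff, if_neg] at h; exact ih h

-- B's port returns true exactly on pvP
lemma pvB_iff (a b : String) : is_language_variant_py_alt a b = true ↔ pvP a b := by
  unfold is_language_variant_py_alt pvVariants pvP
  rw [PySem.Set.contains_iff, PySem.Set.mem_discard]
  rw [pvAnyEnds_eq]
  have hmapa : b ∈ pvSuffixes.map (fun suf => a ++ suf) ↔ pvStemB b pvSuffixes = some a := by
    rw [pvStemB_eq_some b a _ pvSuffixes_len3]
    simp [eq_comm]
  rcases hsa : pvStemB a pvSuffixes with _ | s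
  · -- slug_a carries no suffix
    simp only [Option.isSome_none, Bool.false_eq_true, if_neg, not_false_iff]
    rw [PySem.Set.mem_ofList, hmapa]
    constructor
    · rintro ⟨h1, h2⟩
      exact ⟨Ne.symm h2, Or.inl h1⟩
    · rintro ⟨h1, h2 | h2 | ⟨t, h2, _⟩⟩
      · exact ⟨h2, Ne.symm h1⟩
      · simp at h2
      · simp at h2
  · -- slug_a = s ++ suffix
    have hs : s = PySem.Str.slice a none (some (-3)) := pvStemB_eq_slice a s _ hsa
    simp only [Option.isSome_some, if_pos]
    rw [PySem.Set.mem_foldl_add, PySem.Set.mem_add, PySem.Set.mem_ofList, hmapa, ← hs]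
    have hmaps : (∃ suf ∈ pvSuffixes, b = s ++ suf) ↔ pvStemB b pvSuffixes = some s := by
      rw [pvStemB_eq_some b s _ pvSuffixes_len3]
    constructor
    · rintro ⟨(h1 | h1) | ⟨suf, hm, h1⟩, h2⟩
      · exact ⟨Ne.symm h2, Or.inl h1⟩
      · exact ⟨Ne.symm h2, Or.inr (Or.inl (congrArg some h1.symm))⟩
      · exact ⟨Ne.symm h2, Or.inr (Or.inr ⟨s, rfl, hmaps.mp ⟨suf, hm, h1⟩⟩)⟩
    · rintro ⟨h1, h2 | h2 | ⟨t, h2, h3⟩⟩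
      · exact ⟨Or.inl (Or.inl h2), Ne.symm h1⟩
      · refine ⟨Or.inl (Or.inr ?_), Ne.symm h1⟩
        exact (Option.some.inj h2).symm
      · have hts : t = s := (Option.some.inj h2).symm
        obtain ⟨suf, hm, hb⟩ := hmaps.mpr (hts ▸ h3)
        exact ⟨Or.inr ⟨suf, hm, hb⟩, Ne.symm h1⟩

-- A's port returns true exactly on pvP
lemma pvA_iff (a b : String) : is_language_variant_py a b = true ↔ pvP a b := by
  unfold is_language_variant_py pvP
  by_cases hab : a = b
  · subst hab; simp
  · have hab' : (a == b) = false := by simp [hab]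
    simp only [hab', Bool.false_eq_true, if_false]
    rw [pvAny_eq a b]
    rw [List.foldl_cons, List.foldl_cons, List.foldl_nil,
      pvStemLoopA_eq _ a _ pvSuffixes_len3, pvStemLoopA_eq _ b _ pvSuffixes_len3]
    rcases hsa : pvStemB a pvSuffixes with _ | s <;>
      rcases hsb : pvStemB b pvSuffixes with _ | t
    · simp [PySem.Dict.size_empty, hab]
    · rw [Bool.eq_iff_iff] at *
      simp [PySem.Dict.size_insert, PySem.Dict.size_empty, PySem.Dict.contains_empty, hab]
    · rw [Bool.eq_iff_iff] at *
      simp [PySem.Dict.size_insert, PySem.Dict.size_empty, PySem.Dict.contains_empty, hab]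
    · have hcb : (PySem.Dict.empty.insert a s).contains b = false := by
        rw [PySem.Dict.contains_insert]
        simp [PySem.Dict.contains_empty, Ne.symm hab]
      have hsize : ((PySem.Dict.empty.insert a s).insert b t).size = 2 := by
        simp [PySem.Dict.size_insert, hcb, PySem.Dict.contains_empty, PySem.Dict.size_empty]
      have hvals : ((PySem.Dict.empty.insert a s).insert b t).values = [s, t] := by
        simp only [PySem.Dict.values]
        rw [PySem.Dict.items_insert_of_not_contains _ _ hcb,
          PySem.Dict.items_insert_of_not_contains _ _ (PySem.Dict.contains_empty a)]
        simp [PySem.Dict.empty]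
      rw [hsize, hvals, pvSetLen_pair]
      by_cases hst : s = t
      · simp [hst, hab]
      · rw [if_neg hst]
        simp only [hab, ne_eq, not_false_iff, true_and, beq_iff_eq,
          Option.some.injEq, Bool.and_eq_true]
        constructor
        · intro h
          split_ifs at h with h1 h2
          · rcases Bool.or_eq_true_iff.mp h1 with h3 | h3
            · exact Or.inl (by simpa using h3)
            · exact Or.inr (Or.inl (by simpa using h3))
          · exact absurd h2 (by decide)
        · rintro (h | h | ⟨u, h1, h2⟩)
          · simp [h]
          · simp [h]
          · exact absurd (h1.trans h2.symm) hst

-- ===== VERDICT =====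
theorem is_language_variant_py_spec : Claim_equal_is_language_variant_py := by
  intro a b _dom
  unfold Spec_is_language_variant_py
  rw [Bool.eq_iff_iff, pvA_iff, pvB_iff]
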